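-- pv_equiv track=rewrite | github.com/jvorndran/Unravel | rag_lens/ui/steps/export.py | _strip_docstring
-- ===== SOURCE A (Python) =====
-- def _strip_docstring(code: str) -> str:
--     """Remove the module docstring from generated code."""
--     lines = code.split('\n')
--     in_docstring = False
--     result_lines = []
--
--     for i, line in enumerate(lines):
--         if i == 0 and line.strip().startswith('"""'):
--             in_docstring = True
--             # Check if docstring ends on same line
--             if line.strip().endswith('"""') and len(line.strip()) > 3:
--                 continue
--             continue
--
--         if in_docstring:
--             if '"""' in line:
--                 in_docstring = False
--             continue
--
--         result_lines.append(line)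
--
--     return '\n'.join(result_lines).strip()
-- ===== SOURCE B (Python) =====
-- def _strip_docstring(code: str) -> str:
--     """Remove the module docstring from generated code."""
--     lines = code.split('\n')
--     first = lines[0].strip()
--     if not first.startswith('"""'):
--         start = 0
--     elif first.endswith('"""') and len(first) > 3:
--         # single-line docstring: drop just that line
--         start = 1
--     else:
--         # multi-line docstring: drop through the closing line ('' if never closed)
--         start = len(lines)
--         for j in range(1, len(lines)):
--             if '"""' in lines[j]:
--                 start = j + 1
--                 break
--     return '\n'.join(lines[start:]).strip()
-- ===== Notes on version B (the rewrite author's own statement) =====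
-- stated objective: simpler
-- what changed: B computes the docstring's extent (none / single-line / index of the closing line) first and slices the line list once, instead of A's single pass that accumulates kept lines behind an in_docstring flag; B also fixes A's single-line-docstring bug.
-- intended difference: On inputs whose first line is a closed single-line docstring followed by any non-whitespace text, A (whose inner endswith check is dead code, both branches continue) keeps skipping lines through the next line containing a triple quote, typically returning an empty string, while B drops only the docstring line, which is the intended behaviour of removing the module docstring. — e.g. on _strip_docstring("\"\"\"doc\"\"\"\nx = 1"): A returns "", B returns "x = 1"
import Mathlib
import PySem

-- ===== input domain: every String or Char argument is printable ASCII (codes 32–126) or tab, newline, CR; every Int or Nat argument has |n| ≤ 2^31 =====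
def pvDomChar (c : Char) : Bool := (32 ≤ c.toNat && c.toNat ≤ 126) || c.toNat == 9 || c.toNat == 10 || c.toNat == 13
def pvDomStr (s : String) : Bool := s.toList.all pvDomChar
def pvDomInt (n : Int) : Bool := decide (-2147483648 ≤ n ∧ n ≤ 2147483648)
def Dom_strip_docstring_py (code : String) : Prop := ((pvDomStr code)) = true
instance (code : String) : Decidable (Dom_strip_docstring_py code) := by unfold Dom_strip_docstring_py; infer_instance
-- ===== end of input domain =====

-- B computes the docstring's extent first and slices the line list once, instead of A's
-- flag-and-accumulate pass; on a single-line first docstring B drops just that line where A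
-- (whose inner 'if' is dead code) keeps skipping lines.

-- ===== PORT A =====
-- one step of A's for-loop: state = (in_docstring, result_lines), item = (i, line)
def pvStepA (st : Bool × List String) (il : Int × String) : Bool × List String :=
  if il.1 == 0 && PySem.Str.startswith (PySem.Str.strip il.2) "\"\"\"" then
    -- (A's inner 'if …endswith…' has 'continue' in both branches: no state change either way)
    (true, st.2)
  else if st.1 then
    (if PySem.Str.isIn "\"\"\"" il.2 then false else true, st.2)
  else
    (st.1, st.2 ++ [il.2])

def strip_docstring_py (code : String) : String :=
  let lines := (PySem.Str.split? code "\n").getD []   -- sep "\n" ≠ "": split? is always some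
  let st := (PySem.List.enumerate lines 0).foldl pvStepA (false, [])
  PySem.Str.strip (PySem.Str.join "\n" st.2)

-- ===== PORT B =====
-- B's for-j loop: first j ≥ start index with '"""' in lines[j] gives j+1, else len(lines)
def pvFindClose (j : Nat) : List String → Nat
  | [] => j
  | l :: rest => if PySem.Str.isIn "\"\"\"" l then j + 1 else pvFindClose (j + 1) rest

def strip_docstring_py_alt (code : String) : String :=
  let lines := (PySem.Str.split? code "\n").getD []   -- sep "\n" ≠ "": split? is always some
  let first := PySem.Str.strip (lines.headD "")
  let start :=
    if !PySem.Str.startswith first "\"\"\"" then 0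
    else if PySem.Str.endswith first "\"\"\"" && PySem.Str.len first > 3 then 1
    else pvFindClose 1 lines.tail
  PySem.Str.strip (PySem.Str.join "\n" (lines.drop start))

-- ===== PRECONDITION & SPEC =====
-- When the first line is a closed single-line docstring ("""…""" with content) and anything
-- non-whitespace follows it, A also drops every following line through the next line containing
-- '"""' (its inner if is dead code), while B drops only the docstring line, which is the intended
-- behaviour of removing the module docstring.
def D_strip_docstring_py (code : String) : Prop :=
  let f := PySem.Chars.strip (code.toList.takeWhile (· ≠ '\n'))
  let q := List.replicate 3 '\"'
  q <+: f ∧ q <:+ f ∧ f ≠ q ∧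
    PySem.Chars.lstrip (code.toList.dropWhile (· ≠ '\n')) ≠ []
instance (code : String) : Decidable (D_strip_docstring_py code) := by
  unfold D_strip_docstring_py; infer_instance

def Spec_strip_docstring_py (code : String) (out : String) : Prop :=
  ¬ D_strip_docstring_py code → out = strip_docstring_py_alt code
instance (code : String) (out : String) : Decidable (Spec_strip_docstring_py code out) := by
  unfold Spec_strip_docstring_py; infer_instance

def pvDiffWitness_strip_docstring_py : String := "\"\"\"doc\"\"\"\nx = 1"
def pvDiffWitnessOut_strip_docstring_py : String × String := ("", "x = 1")

-- ===== CLAIM (what is proved, stated in full; the proofs are below) =====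
def Claim_unchanged_strip_docstring_py : Prop :=
  ∀ (code : String), Dom_strip_docstring_py code →
    Spec_strip_docstring_py code (strip_docstring_py code)
def Claim_changed_strip_docstring_py : Prop :=
  Dom_strip_docstring_py (pvDiffWitness_strip_docstring_py) ∧
  D_strip_docstring_py (pvDiffWitness_strip_docstring_py) ∧
  strip_docstring_py (pvDiffWitness_strip_docstring_py) = pvDiffWitnessOut_strip_docstring_py.1 ∧
  strip_docstring_py_alt (pvDiffWitness_strip_docstring_py) = pvDiffWitnessOut_strip_docstring_py.2 ∧
  pvDiffWitnessOut_strip_docstring_py.1 ≠ pvDiffWitnessOut_strip_docstring_py.2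
def Claim_exact_strip_docstring_py : Prop :=
  ∀ (code : String), Dom_strip_docstring_py code → D_strip_docstring_py code →
    strip_docstring_py code ≠ strip_docstring_py_alt code

-- ===== LEMMAS AND PROOFS =====

-- with the flag off and index ≥ 1, A's loop appends every remaining line
theorem pvKeepA (rest : List String) : ∀ (k : Int) (acc : List String), 1 ≤ k →
    (PySem.List.enumerate rest k).foldl pvStepA (false, acc) = (false, acc ++ rest) := by
  induction rest with
  | nil => intro k acc _; simp [PySem.List.enumerate_nil]
  | cons l rest ih =>
    intro k acc hk
    have hk0 : (k == 0) = false := by simp; omega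
    have hstep : pvStepA (false, acc) (k, l) = (false, acc ++ [l]) := by
      simp [pvStepA, hk0]
    rw [PySem.List.enumerate_cons, List.foldl_cons, hstep, ih (k + 1) (acc ++ [l]) (by omega)]
    simp

-- helper for B's index arithmetic
theorem pvFindClose_succ (xs : List String) : ∀ (j : Nat), pvFindClose (j + 1) xs = pvFindClose j xs + 1 := by
  induction xs with
  | nil => intro j; rfl
  | cons a xs ih =>
    intro j
    rw [pvFindClose, pvFindClose]
    by_cases ha : PySem.Str.isIn "\"\"\"" a = true
    · rw [if_pos ha, if_pos ha]
    · rw [if_neg ha, if_neg ha, ih]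

-- with the flag on and index ≥ 1, A's loop skips through the first line containing '"""'
theorem pvSkipA (rest : List String) : ∀ (k : Int) (acc : List String), 1 ≤ k →
    ((PySem.List.enumerate rest k).foldl pvStepA (true, acc)).2 =
      acc ++ rest.drop (pvFindClose 0 rest) := by
  induction rest with
  | nil => intro k acc _; simp [PySem.List.enumerate_nil, pvFindClose]
  | cons l rest ih =>
    intro k acc hk
    have hk0 : (k == 0) = false := by simp; omega
    have hstep : pvStepA (true, acc) (k, l) =
        (if PySem.Str.isIn "\"\"\"" l then false else true, acc) := by
      simp [pvStepA, hk0]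
    rw [PySem.List.enumerate_cons, List.foldl_cons, hstep, pvFindClose]
    by_cases h : PySem.Str.isIn "\"\"\"" l = true
    · rw [if_pos h, if_pos h, pvKeepA rest (k + 1) acc (by omega)]
      simp
    · rw [if_neg h, if_neg h, ih (k + 1) acc (by omega), pvFindClose_succ]
      simp

-- simp's normal form of the line predicate, bridged back
theorem pvPredEq : (fun c : Char => !decide (c = '\n')) = (fun c : Char => decide (c ≠ '\n')) := by
  funext c; by_cases h : c = '\n' <;> simp [h]

-- intercalate over a nonempty tail
theorem pvInter_cons (x sep : List Char) (xs : List (List Char)) (h : xs ≠ []) :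
    List.intercalate sep (x :: xs) = x ++ sep ++ List.intercalate sep xs := by
  cases xs with
  | nil => simp at h
  | cons y ys => simp [List.intercalate, List.intersperse]

-- splitOn's worker: its pieces start with the prefix up to the first '\n' and rebuild the input
theorem pvGo_spec (fuel : Nat) : ∀ (l cur : List Char) (acc : List (List Char)),
    l.length ≤ fuel →
    ∃ ps, PySem.Chars.splitOn.go ['\n'] fuel l cur acc = acc.reverse ++ ps ∧ ps ≠ [] ∧
      ps.head? = some (cur.reverse ++ l.takeWhile (fun c => c ≠ '\n')) ∧
      List.intercalate ['\n'] ps = cur.reverse ++ l := by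
  induction fuel with
  | zero =>
    intro l cur acc hl
    have hnil : l = [] := List.eq_nil_of_length_eq_zero (by omega)
    subst hnil
    refine ⟨[cur.reverse], ?_, by simp, by simp, by simp [List.intercalate]⟩
    simp [PySem.Chars.splitOn.go]
  | succ fuel ih =>
    intro l cur acc hl
    cases l with
    | nil =>
      refine ⟨[cur.reverse], ?_, by simp, by simp, by simp [List.intercalate]⟩
      simp [PySem.Chars.splitOn.go]
    | cons c r =>
      rw [PySem.Chars.splitOn.go]
      by_cases hc : c = '\n'
      · subst hc
        rw [if_pos (by simp [List.isPrefixOf])]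
        obtain ⟨ps', hgo, hne, hhead, hint⟩ := ih r [] (cur.reverse :: acc) (by simp at hl; omega)
        refine ⟨cur.reverse :: ps', ?_, by simp, by simp, ?_⟩
        · rw [show List.drop (['\n'].length) ('\n' :: r) = r from rfl, hgo]; simp
        · rw [pvInter_cons _ _ _ hne, hint]; simp
      · rw [if_neg (by simp [List.isPrefixOf]; exact fun h => hc h.symm)]
        obtain ⟨ps, hgo, hne, hhead, hint⟩ := ih r (c :: cur) acc (by simp at hl; omega)
        refine ⟨ps, hgo, hne, ?_, ?_⟩
        · rw [hhead]; simp [hc]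
        · rw [hint]; simp

-- splitting on '\n': head = prefix up to the first '\n', and the pieces rebuild the input
theorem pvSplit_decomp (code : String) :
    ∃ tp, PySem.Chars.splitOn code.toList ['\n']
        = (code.toList.takeWhile (fun c => c ≠ '\n')) :: tp ∧
      List.intercalate ['\n'] ((code.toList.takeWhile (fun c => c ≠ '\n')) :: tp)
        = code.toList := by
  obtain ⟨ps, hgo, hne, hhead, hint⟩ := pvGo_spec (code.toList.length + 1) code.toList [] []
    (by omega)
  cases ps with
  | nil => simp at hne
  | cons p ps' =>
    have hp : p = code.toList.takeWhile (fun c => c ≠ '\n') := by simpa using hhead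
    subst hp
    refine ⟨ps', ?_, by simpa using hint⟩
    unfold PySem.Chars.splitOn
    simpa using hgo
-- the rest of the code (after the first '\n') is rebuilt by the tail pieces
theorem pvRest_eq (code : String) (tp : List (List Char)) (htp : tp ≠ [])
    (hint : List.intercalate ['\n'] ((code.toList.takeWhile (fun c => c ≠ '\n')) :: tp)
      = code.toList) :
    List.intercalate ['\n'] tp = (code.toList.dropWhile (fun c => c ≠ '\n')).drop 1 := by
  rw [pvInter_cons _ _ _ htp] at hint
  have h2 : code.toList.takeWhile (fun c => c ≠ '\n') ++ code.toList.dropWhile (fun c => c ≠ '\n')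
      = code.toList.takeWhile (fun c => c ≠ '\n') ++ (['\n'] ++ List.intercalate ['\n'] tp) := by
    rw [List.takeWhile_append_dropWhile, ← List.append_assoc]
    exact hint.symm
  rw [List.append_cancel_left h2]
  simp

theorem pvRest_nil (code : String) (hint : List.intercalate ['\n']
      [(code.toList.takeWhile (fun c => c ≠ '\n'))] = code.toList) :
    (code.toList.dropWhile (fun c => c ≠ '\n')).drop 1 = [] := by
  have h1 : List.intercalate ['\n'] [(code.toList.takeWhile (fun c => c ≠ '\n'))]
      = code.toList.takeWhile (fun c => c ≠ '\n') := by simp [List.intercalate]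
  have h2 : code.toList.takeWhile (fun c => c ≠ '\n')
      ++ code.toList.dropWhile (fun c => c ≠ '\n')
      = code.toList.takeWhile (fun c => c ≠ '\n') ++ [] := by
    rw [List.takeWhile_append_dropWhile, List.append_nil, ← h1]
    exact hint.symm
  rw [List.append_cancel_left h2]
  simp

-- the generic split? computation both ports perform
theorem pvSplitQ (code : String) : PySem.Str.split? code "\n"
    = some ((PySem.Chars.splitOn code.toList "\n".toList).map String.ofList) := by
  simp [PySem.Str.split?, PySem.Chars.split?]

-- A with an opening first line: everything through the closing line is dropped
theorem pvA_open (code : String) (tp : List (List Char))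
    (hsp : PySem.Chars.splitOn code.toList ['\n']
      = (code.toList.takeWhile (fun c => c ≠ '\n')) :: tp)
    (hs : PySem.Chars.startswith
      (PySem.Chars.strip (code.toList.takeWhile (fun c => c ≠ '\n'))) ['\"', '\"', '\"'] = true) :
    strip_docstring_py code = PySem.Str.strip (PySem.Str.join "\n"
      ((tp.map String.ofList).drop (pvFindClose 0 (tp.map String.ofList)))) := by
  unfold strip_docstring_py
  rw [pvSplitQ code]
  have hl : (PySem.Chars.splitOn code.toList "\n".toList).map String.ofList
      = String.ofList (code.toList.takeWhile (fun c => c ≠ '\n')) :: tp.map String.ofList := by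
    rw [show ("\n".toList) = ['\n'] from rfl, hsp]; simp
  simp only [Option.getD_some, hl]
  rw [PySem.List.enumerate_cons, List.foldl_cons]
  have hsN : PySem.Chars.startswith
      (PySem.Chars.strip (code.toList.takeWhile (fun c => !decide (c = '\n'))))
      ['\"', '\"', '\"'] = true := by rw [pvPredEq]; exact hs
  have hstep0 : pvStepA (false, [])
      ((0 : Int), String.ofList (code.toList.takeWhile (fun c => c ≠ '\n'))) = (true, []) := by
    simp [pvStepA, hsN]
  rw [hstep0]
  rw [pvSkipA (tp.map String.ofList) (0 + 1) [] (by omega)]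
  simp

-- B with a closed single-line docstring first line: exactly that line is dropped
theorem pvB_single (code : String) (tp : List (List Char))
    (hsp : PySem.Chars.splitOn code.toList ['\n']
      = (code.toList.takeWhile (fun c => c ≠ '\n')) :: tp)
    (hs : PySem.Chars.startswith
      (PySem.Chars.strip (code.toList.takeWhile (fun c => c ≠ '\n'))) ['\"', '\"', '\"'] = true)
    (he : PySem.Chars.endswith
      (PySem.Chars.strip (code.toList.takeWhile (fun c => c ≠ '\n'))) ['\"', '\"', '\"'] = true)
    (hlen : 3 < (PySem.Chars.strip (code.toList.takeWhile (fun c => c ≠ '\n'))).length) :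
    strip_docstring_py_alt code
      = PySem.Str.strip (PySem.Str.join "\n" (tp.map String.ofList)) := by
  unfold strip_docstring_py_alt
  rw [pvSplitQ code]
  have hl : (PySem.Chars.splitOn code.toList "\n".toList).map String.ofList
      = String.ofList (code.toList.takeWhile (fun c => c ≠ '\n')) :: tp.map String.ofList := by
    rw [show ("\n".toList) = ['\n'] from rfl, hsp]; simp
  simp only [Option.getD_some, hl, List.headD_cons, List.tail_cons]
  have hsN : PySem.Chars.startswith
      (PySem.Chars.strip (code.toList.takeWhile (fun c => !decide (c = '\n'))))
      ['\"', '\"', '\"'] = true := by rw [pvPredEq]; exact hs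
  have heN : PySem.Chars.endswith
      (PySem.Chars.strip (code.toList.takeWhile (fun c => !decide (c = '\n'))))
      ['\"', '\"', '\"'] = true := by rw [pvPredEq]; exact he
  have hlenN : 3 < (PySem.Chars.strip
      (code.toList.takeWhile (fun c => !decide (c = '\n')))).length := by
    rw [pvPredEq]; exact hlen
  simp [hsN, heN, hlenN]

-- a whole piece sits inside the intercalation
theorem pvMem_piece_mem (a : Char) : ∀ (ps : List (List Char)) (p : List Char), p ∈ ps → a ∈ p →
    a ∈ List.intercalate ['\n'] ps := by
  intro ps
  induction ps with
  | nil => simp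
  | cons x xs ih =>
    intro p hp ha
    cases xs with
    | nil =>
      simp at hp
      subst hp
      simpa [List.intercalate] using ha
    | cons y ys =>
      rw [pvInter_cons _ _ _ (by simp)]
      rcases List.mem_cons.mp hp with h | h
      · subst h; simp [ha]
      · simp [ih p h ha]

-- counting a non-'\n' character distributes over the pieces
theorem pvCount_inter (a : Char) (ha : a ≠ '\n') : ∀ (ps : List (List Char)),
    (List.intercalate ['\n'] ps).count a = (ps.map (fun p => p.count a)).sum := by
  intro ps
  induction ps with
  | nil => simp [List.intercalate]
  | cons x xs ih =>
    cases xs with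
    | nil => simp [List.intercalate]
    | cons y ys =>
      have h0 : List.count a ['\n'] = 0 := by
        rw [List.count_eq_zero]; simpa using ha
      rw [pvInter_cons _ _ _ (by simp), List.count_append, List.count_append, ih, h0]
      simp

theorem pvCount_join (a : Char) (ha : a ≠ '\n') (ps : List (List Char)) :
    (PySem.Chars.join ['\n'] ps).count a = (ps.map (fun p => p.count a)).sum :=
  pvCount_inter a ha ps

-- strip never removes a non-whitespace character
theorem pvCount_dropWhile (l : List Char) (p : Char → Bool) (a : Char) (ha : p a = false) :
    (l.dropWhile p).count a = l.count a := by
  conv_rhs => rw [← List.takeWhile_append_dropWhile (p := p) (l := l)]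
  rw [List.count_append]
  have : (l.takeWhile p).count a = 0 := by
    rw [List.count_eq_zero]
    intro hmem
    exact absurd (List.mem_takeWhile_imp hmem) (by simp [ha])
  omega

theorem pvCount_strip (l : List Char) (a : Char) (ha : PySem.Chars.isspace a = false) :
    (PySem.Chars.strip l).count a = l.count a := by
  unfold PySem.Chars.strip PySem.Chars.rstrip PySem.Chars.lstrip
  rw [List.count_reverse, pvCount_dropWhile _ _ _ ha, List.count_reverse,
    pvCount_dropWhile _ _ _ ha]

-- a line containing '"""' carries at least three '"' characters
theorem pvPiece_count (piece : List Char)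
    (h : PySem.Chars.isIn ['\"', '\"', '\"'] piece = true) : 3 ≤ piece.count '\"' := by
  obtain ⟨s, t, hst⟩ := (PySem.Chars.isIn_iff_infix _ _).mp h
  rw [← hst]
  simp [List.count_append]
  omega

-- an all-whitespace string strips to nothing
theorem pvStrip_allspace (l : List Char) (h : ∀ c ∈ l, PySem.Chars.isspace c = true) :
    PySem.Chars.strip l = [] := by
  unfold PySem.Chars.strip PySem.Chars.rstrip PySem.Chars.lstrip
  rw [List.dropWhile_eq_nil_iff.mpr (fun c hc => h c hc)]
  simp

-- pvFindClose when no line closes the docstring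
theorem pvFindClose_none : ∀ (lines : List String) (j : Nat),
    (∀ l ∈ lines, PySem.Str.isIn "\"\"\"" l = false) → pvFindClose j lines = j + lines.length := by
  intro lines
  induction lines with
  | nil => intro j _; simp [pvFindClose]
  | cons l rest ih =>
    intro j h
    have h' := h l (by simp)
    simp at h'
    rw [pvFindClose, if_neg (by simp [h'])]
    rw [ih (j + 1) (fun x hx => h x (by simp [hx]))]
    simp
    omega

-- pvFindClose when some line closes the docstring
theorem pvFindClose_some : ∀ (lines : List String) (j : Nat),
    (∃ l ∈ lines, PySem.Str.isIn "\"\"\"" l = true) →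
    ∃ m, m < lines.length ∧ pvFindClose j lines = j + (m + 1) ∧
      ∃ l ∈ lines.take (m + 1), PySem.Str.isIn "\"\"\"" l = true := by
  intro lines
  induction lines with
  | nil => intro j h; simp at h
  | cons l rest ih =>
    intro j h
    by_cases hl : PySem.Str.isIn "\"\"\"" l = true
    · exact ⟨0, by simp, by rw [pvFindClose, if_pos hl], ⟨l, by simp, hl⟩⟩
    · obtain ⟨x, hx, hxq⟩ := h
      rcases List.mem_cons.mp hx with h' | h'
      · exact absurd (h' ▸ hxq) hl
      · obtain ⟨m, hm, heq, l', hl', hl'q⟩ := ih (j + 1) ⟨x, h', hxq⟩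
        refine ⟨m + 1, by simp; omega, ?_, ⟨l', by simp [hl'], hl'q⟩⟩
        rw [pvFindClose, if_neg hl, heq]
        omega

-- skipping the first line's '\n' does not change what lstrip removes
theorem pvLstripDW (l : List Char) : PySem.Chars.lstrip (l.dropWhile (fun c => c ≠ '\n'))
    = PySem.Chars.lstrip ((l.dropWhile (fun c => c ≠ '\n')).drop 1) := by
  induction l with
  | nil => simp
  | cons a t ih =>
    by_cases ha : a = '\n'
    · subst ha
      rw [List.dropWhile_cons, if_neg (by simp)]
      unfold PySem.Chars.lstrip
      rw [List.dropWhile_cons, if_pos (by decide)]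
      simp
    · rw [List.dropWhile_cons, if_pos (by simp [ha])]
      exact ih

-- ===== VERDICT (by name: the statement is the Claim_ definition above) =====
theorem strip_docstring_py_spec : Claim_unchanged_strip_docstring_py := by
  intro code _ hnd
  obtain ⟨tp, hsp, hint⟩ := pvSplit_decomp code
  by_cases hs : PySem.Chars.startswith
      (PySem.Chars.strip (code.toList.takeWhile (fun c => c ≠ '\n'))) ['\"', '\"', '\"'] = true
  · by_cases hse : PySem.Chars.endswith
        (PySem.Chars.strip (code.toList.takeWhile (fun c => c ≠ '\n'))) ['\"', '\"', '\"'] = true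
        ∧ 3 < (PySem.Chars.strip (code.toList.takeWhile (fun c => c ≠ '\n'))).length
    · -- single-line docstring, outside D_: everything after it is whitespace, both return ''
      have hws : ∀ c ∈ (code.toList.dropWhile (fun c => c ≠ '\n')).drop 1,
          PySem.Chars.isspace c = true := by
        intro c hc
        by_contra hcon
        refine hnd ?_
        simp only [D_strip_docstring_py]
        have hq : List.replicate 3 '\"' = ['\"', '\"', '\"'] := rfl
        refine ⟨?_, ?_, ?_, ?_⟩
        · rw [hq]; exact (PySem.Chars.startswith_iff _ _).mp hs
        · rw [hq]; exact (PySem.Chars.endswith_iff _ _).mp hse.1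
        · intro hfq
          have hql := congrArg List.length hfq
          rw [hq, show (['\"', '\"', '\"'] : List Char).length = 3 from rfl] at hql
          omega
        · rw [pvLstripDW]
          intro hnil
          unfold PySem.Chars.lstrip at hnil
          have hall := List.dropWhile_eq_nil_iff.mp hnil
          exact hcon (hall c hc)
      rw [pvA_open code tp hsp hs, pvB_single code tp hsp hs hse.1 hse.2]
      cases htp : tp with
      | nil => simp
      | cons p ps =>
        have htp' : tp ≠ [] := by rw [htp]; simp
        rw [← htp]
        have hrest := pvRest_eq code tp htp' hint
        -- every tail line is all-whitespace, so no line contains '"""'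
        have hnoq : ∀ l ∈ tp.map String.ofList, PySem.Str.isIn "\"\"\"" l = false := by
          intro l hlmem
          obtain ⟨piece, hpm, rfl⟩ := List.mem_map.mp hlmem
          by_contra hcon
          have hq : PySem.Chars.isIn ['\"', '\"', '\"'] piece = true := by
            simpa using (Bool.not_eq_false _).mp hcon
          obtain ⟨st, tt, hst⟩ := (PySem.Chars.isIn_iff_infix _ _).mp hq
          have hmem : '\"' ∈ piece := by rw [← hst]; simp
          have : PySem.Chars.isspace '\"' = true :=
            hws '\"' (hrest ▸ pvMem_piece_mem '\"' tp piece hpm hmem)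
          simp [PySem.Chars.isspace] at this
        rw [pvFindClose_none (tp.map String.ofList) 0 hnoq]
        rw [show (0 + (tp.map String.ofList).length) = (tp.map String.ofList).length from by omega,
          List.drop_length]
        -- both sides strip an all-whitespace string to ''
        apply String.toList_inj.mp
        simp only [PySem.Str.toList_strip, PySem.Str.toList_join]
        rw [show ("\n".toList) = ['\n'] from rfl]
        have hmaps : List.map String.toList (List.map String.ofList tp) = tp := by
          simp [List.map_map, Function.comp_def]
        rw [hmaps]
        rw [pvStrip_allspace (PySem.Chars.join ['\n'] tp) (by
          intro c hc
          exact hws c (hrest ▸ (by simpa [PySem.Chars.join] using hc)))]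
        rfl
    · -- multi-line docstring opener: both skip through the first closing line
      rw [pvA_open code tp hsp hs]
      unfold strip_docstring_py_alt
      rw [pvSplitQ code]
      have hl : (PySem.Chars.splitOn code.toList "\n".toList).map String.ofList
          = String.ofList (code.toList.takeWhile (fun c => c ≠ '\n')) :: tp.map String.ofList := by
        rw [show ("\n".toList) = ['\n'] from rfl, hsp]; simp
      simp only [Option.getD_some, hl, List.headD_cons, List.tail_cons]
      rw [pvFindClose_succ]
      have hsN : PySem.Chars.startswith
          (PySem.Chars.strip (code.toList.takeWhile (fun c => !decide (c = '\n'))))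
          ['\"', '\"', '\"'] = true := by rw [pvPredEq]; exact hs
      have hseN : ¬(PySem.Chars.endswith
          (PySem.Chars.strip (code.toList.takeWhile (fun c => !decide (c = '\n'))))
          ['\"', '\"', '\"'] = true ∧
          3 < (PySem.Chars.strip (code.toList.takeWhile (fun c => !decide (c = '\n')))).length) := by
        rw [pvPredEq]; exact hse
      simp [hsN, hseN]
  · -- no docstring: both keep every line
    unfold strip_docstring_py strip_docstring_py_alt
    rw [pvSplitQ code]
    have hl : (PySem.Chars.splitOn code.toList "\n".toList).map String.ofList
        = String.ofList (code.toList.takeWhile (fun c => c ≠ '\n')) :: tp.map String.ofList := by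
      rw [show ("\n".toList) = ['\n'] from rfl, hsp]; simp
    simp only [Option.getD_some, hl, List.headD_cons, List.tail_cons]
    rw [PySem.List.enumerate_cons, List.foldl_cons]
    have hs'N : PySem.Chars.startswith
        (PySem.Chars.strip (code.toList.takeWhile (fun c => !decide (c = '\n'))))
        ['\"', '\"', '\"'] = false := by
      rw [pvPredEq]; simpa using hs
    have hstep0 : pvStepA (false, [])
        ((0 : Int), String.ofList (code.toList.takeWhile (fun c => c ≠ '\n')))
        = (false, [] ++ [String.ofList (code.toList.takeWhile (fun c => c ≠ '\n'))]) := by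
      simp [pvStepA, hs'N]
    rw [hstep0, pvKeepA (tp.map String.ofList) (0 + 1) _ (by omega)]
    simp [hs'N]

theorem strip_docstring_py_changed : Claim_changed_strip_docstring_py := by
  unfold Claim_changed_strip_docstring_py; decide

theorem strip_docstring_py_tight : Claim_exact_strip_docstring_py := by
  intro code _ hD heq
  simp only [D_strip_docstring_py] at hD
  obtain ⟨hpre, hsuf, hne, hlst⟩ := hD
  have hq : List.replicate 3 '\"' = ['\"', '\"', '\"'] := rfl
  rw [hq] at hpre hsuf hne
  have hs : PySem.Chars.startswith (PySem.Chars.strip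
      (code.toList.takeWhile (fun c => c ≠ '\n'))) ['\"', '\"', '\"'] = true :=
    (PySem.Chars.startswith_iff _ _).mpr hpre
  have he : PySem.Chars.endswith (PySem.Chars.strip
      (code.toList.takeWhile (fun c => c ≠ '\n'))) ['\"', '\"', '\"'] = true :=
    (PySem.Chars.endswith_iff _ _).mpr hsuf
  have hlen : 3 < (PySem.Chars.strip (code.toList.takeWhile (fun c => c ≠ '\n'))).length := by
    have h3 := hpre.length_le
    rw [show (['\"', '\"', '\"'] : List Char).length = 3 from rfl] at h3
    rcases Nat.lt_or_ge 3 (PySem.Chars.strip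
        (code.toList.takeWhile (fun c => c ≠ '\n'))).length with h | h
    · exact h
    · exact absurd (hpre.eq_of_length
        (by rw [show (['\"', '\"', '\"'] : List Char).length = 3 from rfl]; omega)).symm hne
  rw [pvLstripDW] at hlst
  obtain ⟨c, hcmem, hcns⟩ : ∃ x ∈ (code.toList.dropWhile (fun c => c ≠ '\n')).drop 1,
      PySem.Chars.isspace x = false := by
    by_contra hall
    apply hlst
    unfold PySem.Chars.lstrip
    apply List.dropWhile_eq_nil_iff.mpr
    intro x hx
    by_contra hxs
    exact hall ⟨x, hx, by simpa using hxs⟩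
  obtain ⟨tp, hsp, hint⟩ := pvSplit_decomp code
  cases htp : tp with
  | nil =>
    rw [htp] at hint
    rw [pvRest_nil code hint] at hcmem
    simp at hcmem
  | cons p ps =>
    have htp' : tp ≠ [] := by rw [htp]; simp
    rw [← htp] at *
    have hrest := pvRest_eq code tp htp' hint
    rw [pvA_open code tp hsp hs, pvB_single code tp hsp hs he hlen] at heq
    have heqL := congrArg String.toList heq
    simp only [PySem.Str.toList_strip, PySem.Str.toList_join] at heqL
    rw [show ("\n".toList) = ['\n'] from rfl] at heqL
    have hmaps : List.map String.toList (List.map String.ofList tp) = tp := by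
      simp [List.map_map, Function.comp_def]
    by_cases hq : ∃ l ∈ tp.map String.ofList, PySem.Str.isIn "\"\"\"" l = true
    · -- a later line contains '"""': A loses at least three '"' characters that B keeps
      obtain ⟨m, hm, hk, l', hl'mem, hl'q⟩ := pvFindClose_some (tp.map String.ofList) 0 hq
      rw [hk] at heqL
      have hmapsd : List.map String.toList (List.drop (0 + (m + 1)) (List.map String.ofList tp))
          = List.drop (m + 1) tp := by
        rw [List.map_drop, hmaps]
        norm_num
      rw [hmapsd, hmaps] at heqL
      have hcount := congrArg (fun l : List Char => l.count '\"') heqL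
      simp only at hcount
      rw [pvCount_strip _ _ (by decide), pvCount_strip _ _ (by decide),
        pvCount_join '\"' (by decide) _, pvCount_join '\"' (by decide) _] at hcount
      obtain ⟨piece, hpcm, hpeq⟩ := List.mem_map.mp (by
        rw [← List.map_take] at hl'mem; exact hl'mem)
      have hq3 : 3 ≤ piece.count '\"' := pvPiece_count piece (by
        have h' := hl'q
        rw [← hpeq] at h'
        simpa using h')
      have h3 : 3 ≤ ((tp.take (m + 1)).map (fun p => p.count '\"')).sum :=
        le_trans hq3 (List.single_le_sum (fun _ _ => Nat.zero_le _) _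
          (List.mem_map_of_mem hpcm))
      have hsum : ((tp.take (m + 1)).map (fun p => p.count '\"')).sum
          + ((tp.drop (m + 1)).map (fun p => p.count '\"')).sum
          = (tp.map (fun p => p.count '\"')).sum := by
        rw [List.map_take, List.map_drop, List.sum_take_add_sum_drop]
      omega
    · -- no later line contains '"""': A returns '' while B keeps the non-whitespace rest
      push Not at hq
      have hnoq : ∀ l ∈ tp.map String.ofList, PySem.Str.isIn "\"\"\"" l = false := by
        intro l hl
        simpa using hq l hl
      rw [pvFindClose_none (tp.map String.ofList) 0 hnoq] at heqL
      rw [show (0 + (tp.map String.ofList).length) = (tp.map String.ofList).length from by omega,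
        List.drop_length, hmaps] at heqL
      have hcpos : 0 < (PySem.Chars.strip (PySem.Chars.join ['\n'] tp)).count c := by
        rw [pvCount_strip _ _ hcns, List.count_pos_iff]
        rw [show PySem.Chars.join ['\n'] tp = List.intercalate ['\n'] tp from rfl, hrest]
        exact hcmem
      rw [← heqL] at hcpos
      rw [show PySem.Chars.strip (PySem.Chars.join ['\n'] (List.map String.toList
        ([] : List String))) = [] from rfl] at hcpos
      simp at hcpos
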